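-- pv_equiv track=rewrite | github.com/zi007lin/tezos-ico-password-recovery-v2 | src/functions.py | sequenzerwithvsalt
-- ===== SOURCE A (Python) =====
-- def sequenzerwithvsalt(L, V, W, X, Y, Z, E):
--     import itertools
--
--     sequ = []
--     output1 = ""
--     comp_count = V + W + X + Y + Z
--     sequ_count = 0
--
--     if L == 1:
--         output1 = "LV"
--     else:
--         output1 = "V"
--     if comp_count == 5:
--         for subset in itertools.product("WXYZ", "WXYZ", "WXYZ", "WXYZ"):
--             if L == 0:
--                 output1 = "V"
--             else:
--                 output1 = "LV"
--             for p in subset: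
--                 output1 = output1 + p
--             if len(output1) != len(set(output1)):
--                 continue
--             if E == 1:
--                 output1 = output1 + "E"
--             sequ.append(output1)
--             sequ_count += 1
--             output1 = ""
--     elif comp_count == 4:
--         for subset in itertools.product("WXZ", "WXZ", "WXZ"):
--             if L == 0:
--                 output1 = "V"
--             else:
--                 output1 = "LV"
--             for p in subset:
--                 output1 = output1 + p
--             if len(output1) != len(set(output1)):
--                 continue
--             if E == 1:
--                 output1 = output1 + "E"
--             sequ.append(output1)
--             sequ_count += 1
--             output1 = ""
--     elif comp_count == 3:
--         for subset in itertools.product("WZ", "WZ"):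
--             if L == 0:
--                 output1 = "V"
--             else:
--                 output1 = "LV"
--             for p in subset:
--                 output1 = output1 + p
--             if len(output1) != len(set(output1)):
--                 continue
--             if E == 1:
--                 output1 = output1 + "E"
--             sequ.append(output1)
--             sequ_count += 1
--             output1 = ""
--     else:
--         for subset in itertools.product("Z"):
--             if L == 0:
--                 output1 = "V"
--             else:
--                 output1 = "LV"
--             for p in subset:
--                 output1 = output1 + p
--             if len(output1) != len(set(output1)):
--                 continue
--             if E == 1:
--                 output1 = output1 + "E"
--             sequ.append(output1)
--             sequ_count += 1
--             output1 = ""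
--     sequ_with_vsalt = sequ
--
--     return sequ_with_vsalt
-- ===== SOURCE B (Python) =====
-- def sequenzerwithvsalt(L, V, W, X, Y, Z, E):
--     from itertools import permutations
--     c = V + W + X + Y + Z
--     alphabet = {5: "WXYZ", 4: "WXZ", 3: "WZ"}.get(c, "Z")
--     prefix = "V" if L == 0 else "LV"
--     suffix = "E" if E == 1 else ""
--     return [prefix + "".join(p) + suffix for p in permutations(alphabet)]
-- ===== Notes on version B (the rewrite author's own statement) =====
-- stated objective: simpler
-- what changed: B replaces A's four copy-pasted product-over-repeated-alphabet loops with per-string distinctness filtering by one direct enumeration of full-length permutations of the alphabet chosen from comp_count, with prefix/suffix computed once; the filtering pass disappears entirely.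
import Mathlib
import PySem

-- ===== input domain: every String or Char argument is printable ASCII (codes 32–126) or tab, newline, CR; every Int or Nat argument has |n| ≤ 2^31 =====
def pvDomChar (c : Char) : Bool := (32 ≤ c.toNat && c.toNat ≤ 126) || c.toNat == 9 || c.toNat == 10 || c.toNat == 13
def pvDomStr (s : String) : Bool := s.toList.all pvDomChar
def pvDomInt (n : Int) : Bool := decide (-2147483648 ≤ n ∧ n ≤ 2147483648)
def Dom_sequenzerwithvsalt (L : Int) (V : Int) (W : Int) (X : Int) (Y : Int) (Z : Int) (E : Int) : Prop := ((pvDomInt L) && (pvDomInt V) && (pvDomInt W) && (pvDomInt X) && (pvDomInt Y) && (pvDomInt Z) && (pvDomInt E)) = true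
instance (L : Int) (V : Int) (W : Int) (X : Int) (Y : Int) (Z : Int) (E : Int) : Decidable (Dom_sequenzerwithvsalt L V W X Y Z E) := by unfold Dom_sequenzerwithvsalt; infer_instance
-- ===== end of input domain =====

-- B replaces A's four product-then-filter-distinct branches by one direct enumeration
-- of full-length permutations of the chosen alphabet (objective: simpler).

-- ===== PORT A =====
-- itertools.product of n copies of the same character list, in itertools order
def pvProd (alpha : List Char) : Nat → List (List Char)
  | 0 => [[]]
  | n + 1 => alpha.flatMap (fun c => (pvProd alpha n).map (fun r => c :: r))

-- the body of each of A's four identical loops (output1 kept as List Char, made a String on append)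
def pvBodyA (L E : Int) (sequ : List String) (subset : List Char) : List String :=
  let o0 : List Char := if L == 0 then ['V'] else ['L', 'V']
  let o1 : List Char := subset.foldl (fun o p => o ++ [p]) o0
  if o1.length ≠ (PySem.Set.ofList o1).length then sequ
  else
    let o2 : List Char := if E == 1 then o1 ++ ['E'] else o1
    sequ ++ [String.mk o2]

def sequenzerwithvsalt (L : Int) (V : Int) (W : Int) (X : Int) (Y : Int) (Z : Int) (E : Int) : List String :=
  let comp_count : Int := V + W + X + Y + Z
  if comp_count == 5 then (pvProd ['W','X','Y','Z'] 4).foldl (pvBodyA L E) []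
  else if comp_count == 4 then (pvProd ['W','X','Z'] 3).foldl (pvBodyA L E) []
  else if comp_count == 3 then (pvProd ['W','Z'] 2).foldl (pvBodyA L E) []
  else (pvProd ['Z'] 1).foldl (pvBodyA L E) []

-- ===== PORT B =====
-- all ways to pick one element together with the remaining list, in order
def pvSelections : List Char → List (Char × List Char)
  | [] => []
  | x :: xs => (x, xs) :: (pvSelections xs).map (fun p => (p.1, x :: p.2))

-- itertools.permutations (full length) in itertools order; fuel = length
def pvPermsAux : Nat → List Char → List (List Char)
  | 0, _ => [[]]
  | n + 1, l => (pvSelections l).flatMap (fun p => (pvPermsAux n p.2).map (fun r => p.1 :: r))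

def pvPerms (l : List Char) : List (List Char) := pvPermsAux l.length l

def sequenzerwithvsalt_alt (L : Int) (V : Int) (W : Int) (X : Int) (Y : Int) (Z : Int) (E : Int) : List String :=
  let c : Int := V + W + X + Y + Z
  let alpha : List Char :=
    if c == 5 then ['W','X','Y','Z']
    else if c == 4 then ['W','X','Z']
    else if c == 3 then ['W','Z']
    else ['Z']
  let pre : List Char := if L == 0 then ['V'] else ['L','V']
  let suf : List Char := if E == 1 then ['E'] else []
  (pvPerms alpha).map (fun p => String.mk (pre ++ p ++ suf))

-- ===== PRECONDITION & SPEC =====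
def Spec_sequenzerwithvsalt (L : Int) (V : Int) (W : Int) (X : Int) (Y : Int) (Z : Int) (E : Int) (out : List String) : Prop := out = sequenzerwithvsalt_alt L V W X Y Z E
instance (L : Int) (V : Int) (W : Int) (X : Int) (Y : Int) (Z : Int) (E : Int) (out : List String) : Decidable (Spec_sequenzerwithvsalt L V W X Y Z E out) := by unfold Spec_sequenzerwithvsalt; infer_instance

-- ===== CLAIM (what is proved, stated in full; the proofs are below) =====
def Claim_equal_sequenzerwithvsalt : Prop := ∀ (L : Int) (V : Int) (W : Int) (X : Int) (Y : Int) (Z : Int) (E : Int), Dom_sequenzerwithvsalt L V W X Y Z E → Spec_sequenzerwithvsalt L V W X Y Z E (sequenzerwithvsalt L V W X Y Z E)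

-- ===== LEMMAS AND PROOFS =====
-- A's loop body with its two integer tests read off into Bools
def pvBodyB (bL bE : Bool) (sequ : List String) (subset : List Char) : List String :=
  let o0 : List Char := if bL then ['V'] else ['L', 'V']
  let o1 : List Char := subset.foldl (fun o p => o ++ [p]) o0
  if o1.length ≠ (PySem.Set.ofList o1).length then sequ
  else
    let o2 : List Char := if bE then o1 ++ ['E'] else o1
    sequ ++ [String.mk o2]

theorem pvBodyA_eq (L E : Int) : pvBodyA L E = pvBodyB (L == 0) (E == 1) := by
  funext s p; simp [pvBodyA, pvBodyB]

-- the heart of the equivalence: on each of the four fixed alphabets, A's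
-- product-then-filter loop yields exactly B's permutation enumeration
set_option maxRecDepth 100000 in
set_option maxHeartbeats 4000000 in
theorem pv_branch (bL bE : Bool) (alpha : List Char) (n : Nat)
    (hfix : (alpha = ['W','X','Y','Z'] ∧ n = 4) ∨ (alpha = ['W','X','Z'] ∧ n = 3) ∨
            (alpha = ['W','Z'] ∧ n = 2) ∨ (alpha = ['Z'] ∧ n = 1)) :
    (pvProd alpha n).foldl (pvBodyB bL bE) []
      = (pvPerms alpha).map (fun p => String.mk ((if bL then ['V'] else ['L','V']) ++ p ++ (if bE then ['E'] else []))) := by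
  obtain ⟨rfl, rfl⟩ | ⟨rfl, rfl⟩ | ⟨rfl, rfl⟩ | ⟨rfl, rfl⟩ := hfix <;> cases bL <;> cases bE <;> decide

-- ===== VERDICT (by name: the statement is the Claim_ definition above) =====
theorem sequenzerwithvsalt_spec : Claim_equal_sequenzerwithvsalt := by
  intro L V W X Y Z E _
  unfold Spec_sequenzerwithvsalt sequenzerwithvsalt sequenzerwithvsalt_alt
  rw [pvBodyA_eq]
  by_cases h5 : V + W + X + Y + Z = 5
  · have h5' : (V + W + X + Y + Z == 5) = true := by simp [h5]
    simp only [h5', ite_true]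
    exact pv_branch (L == 0) (E == 1) _ _ (Or.inl ⟨rfl, rfl⟩)
  · have h5' : (V + W + X + Y + Z == 5) = false := by simp [h5]
    simp only [h5', ite_false]
    by_cases h4 : V + W + X + Y + Z = 4
    · have h4' : (V + W + X + Y + Z == 4) = true := by simp [h4]
      simp only [h4', ite_true]
      exact pv_branch (L == 0) (E == 1) _ _ (Or.inr (Or.inl ⟨rfl, rfl⟩))
    · have h4' : (V + W + X + Y + Z == 4) = false := by simp [h4]
      simp only [h4', ite_false]
      by_cases h3 : V + W + X + Y + Z = 3
      · have h3' : (V + W + X + Y + Z == 3) = true := by simp [h3]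
        simp only [h3', ite_true]
        exact pv_branch (L == 0) (E == 1) _ _ (Or.inr (Or.inr (Or.inl ⟨rfl, rfl⟩)))
      · have h3' : (V + W + X + Y + Z == 3) = false := by simp [h3]
        simp only [h3', ite_false]
        exact pv_branch (L == 0) (E == 1) _ _ (Or.inr (Or.inr (Or.inr ⟨rfl, rfl⟩)))
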